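-- pv_equiv track=rewrite | github.com/ilyaBobroFF/HomeWorkNoteBook | Listwork.py | delete_list
-- ===== SOURCE A (Python) =====
-- def delete_list(list_note, id):
--     del_ok = False
--     new_list = list()
--     for item in list_note:
--         if item[0] == str(id):
--             del_ok = True
--         else:
--             if(del_ok):
--                 item[0] = str(int(item[0]) - 1)
--                 new_list.append(item)
--             else:
--                 new_list.append(item)
--     return new_list
-- ===== SOURCE B (Python) =====
-- def delete_list(list_note, id):
--     target = str(id)
--     heads = [item[0] for item in list_note]
--     try:
--         k = heads.index(target)
--     except ValueError:
--         return list(list_note)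
--     kept = list_note[:k]
--     for item in list_note[k + 1:]:
--         if item[0] != target:
--             item[0] = str(int(item[0]) - 1)
--             kept.append(item)
--     return kept
-- ===== Notes on version B (the rewrite author's own statement) =====
-- stated objective: alternative
-- what changed: Replaces A's flag-driven single pass with a different decomposition: locate the first matching id with list.index, keep the prefix by slicing, then one loop over only the suffix that drops further matches and renumbers the rest.
import Mathlib
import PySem

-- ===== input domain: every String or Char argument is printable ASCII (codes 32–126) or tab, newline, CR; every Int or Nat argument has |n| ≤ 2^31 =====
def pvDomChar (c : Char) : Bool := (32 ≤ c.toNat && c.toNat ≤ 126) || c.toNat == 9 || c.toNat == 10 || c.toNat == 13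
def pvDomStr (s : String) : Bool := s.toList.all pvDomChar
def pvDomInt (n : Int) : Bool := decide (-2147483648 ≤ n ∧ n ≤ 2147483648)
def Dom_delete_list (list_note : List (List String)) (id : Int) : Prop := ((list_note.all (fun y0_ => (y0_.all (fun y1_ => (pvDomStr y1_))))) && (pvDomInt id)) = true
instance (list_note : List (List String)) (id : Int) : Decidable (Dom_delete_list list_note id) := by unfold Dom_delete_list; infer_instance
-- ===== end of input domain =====

-- B replaces A's flag-driven single pass by index-of-first-match + prefix slice + a loop over the
-- suffix only (objective: alternative decomposition, same cost). Equivalence is about the RETURN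
-- value only: the Python A (and B) mutate the surviving item lists in place.

-- ===== PORT A =====
-- item[0] → PySem.List.pyGetD item 0 "" and int(item[0]) → (ofStr? …).getD 0: both total here;
-- Pre_delete_list excludes exactly the inputs where the Python would raise at those spots.
def delete_list (list_note : List (List String)) (id : Int) : List (List String) :=
  (list_note.foldl
    (fun (st : Bool × List (List String)) item =>
      if PySem.List.pyGetD item 0 "" = PySem.Int.toStr id then
        (true, st.2)
      else
        if st.1 then
          (st.1, st.2 ++ [PySem.List.pySetD item 0
            (PySem.Int.toStr ((PySem.Int.ofStr? (PySem.List.pyGetD item 0 "")).getD 0 - 1))])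
        else
          (st.1, st.2 ++ [item]))
    (false, [])).2

-- ===== PORT B =====
def delete_list_alt (list_note : List (List String)) (id : Int) : List (List String) :=
  let target := PySem.Int.toStr id
  let heads := list_note.map (fun item => PySem.List.pyGetD item 0 "")
  match PySem.List.index? heads target with
  | none => list_note
  | some k =>
      (PySem.List.slice list_note (some ((k : Int) + 1)) none).foldl
        (fun kept item =>
          if PySem.List.pyGetD item 0 "" ≠ target then
            kept ++ [PySem.List.pySetD item 0
              (PySem.Int.toStr ((PySem.Int.ofStr? (PySem.List.pyGetD item 0 "")).getD 0 - 1))]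
          else kept)
        (PySem.List.slice list_note none (some (k : Int)))

-- ===== PRECONDITION & SPEC =====
-- Pre_ excludes exactly the inputs on which the Python A raises: an empty item (IndexError at
-- item[0]), or an item that sits after a matching id, is not itself the id, and whose head
-- int() cannot parse (ValueError).
def Pre_delete_list (list_note : List (List String)) (id : Int) : Prop :=
  (∀ it ∈ list_note, it ≠ []) ∧
  ∀ p ∈ list_note.zipIdx, ∀ q ∈ list_note.zipIdx,
    p.2 < q.2 →
    PySem.List.pyGetD p.1 0 "" = PySem.Int.toStr id →
    PySem.List.pyGetD q.1 0 "" ≠ PySem.Int.toStr id →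
    (PySem.Int.ofStr? (PySem.List.pyGetD q.1 0 "")).isSome
instance (list_note : List (List String)) (id : Int) : Decidable (Pre_delete_list list_note id) := by unfold Pre_delete_list; infer_instance

def pvWitness_delete_list : List (List String) × Int := ([["1", "a"], ["2", "b"], ["3", "c"]], 2)

def Spec_delete_list (list_note : List (List String)) (id : Int) (out : List (List String)) : Prop := out = delete_list_alt list_note id
instance (list_note : List (List String)) (id : Int) (out : List (List String)) : Decidable (Spec_delete_list list_note id out) := by unfold Spec_delete_list; infer_instance

-- ===== CLAIM (what is proved, stated in full; the proofs are below) =====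
def Claim_equal_delete_list : Prop := ∀ (list_note : List (List String)) (id : Int), Dom_delete_list list_note id → Pre_delete_list list_note id → Spec_delete_list list_note id (delete_list list_note id)

-- ===== LEMMAS AND PROOFS =====

-- The renumbered item (item[0] = str(int(item[0]) - 1)), as both Pythons compute it.
def pvDec (item : List String) : List String :=
  PySem.List.pySetD item 0
    (PySem.Int.toStr ((PySem.Int.ofStr? (PySem.List.pyGetD item 0 "")).getD 0 - 1))

-- A's loop body and B's suffix-loop body, for a fixed target string t.
def pvBodyA (t : String) (st : Bool × List (List String)) (item : List String) :
    Bool × List (List String) :=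
  if PySem.List.pyGetD item 0 "" = t then (true, st.2)
  else if st.1 then (st.1, st.2 ++ [pvDec item])
  else (st.1, st.2 ++ [item])

def pvBodyB (t : String) (kept : List (List String)) (item : List String) :
    List (List String) :=
  if PySem.List.pyGetD item 0 "" ≠ t then kept ++ [pvDec item] else kept

theorem delete_list_eq_foldA (list_note : List (List String)) (id : Int) :
    delete_list list_note id
      = (list_note.foldl (pvBodyA (PySem.Int.toStr id)) (false, [])).2 := rfl

theorem bodyA_hit (t : String) (x : List String) (b : Bool) (acc : List (List String))
    (h : PySem.List.pyGetD x 0 "" = t) : pvBodyA t (b, acc) x = (true, acc) := by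
  simp [pvBodyA, h]

theorem bodyA_skip_true (t : String) (x : List String) (acc : List (List String))
    (h : ¬ PySem.List.pyGetD x 0 "" = t) :
    pvBodyA t (true, acc) x = (true, acc ++ [pvDec x]) := by
  simp [pvBodyA, h]

theorem bodyA_skip_false (t : String) (x : List String) (acc : List (List String))
    (h : ¬ PySem.List.pyGetD x 0 "" = t) :
    pvBodyA t (false, acc) x = (false, acc ++ [x]) := by
  simp [pvBodyA, h]

theorem bodyB_hit (t : String) (x : List String) (acc : List (List String))
    (h : PySem.List.pyGetD x 0 "" = t) : pvBodyB t acc x = acc := by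
  simp [pvBodyB, h]

theorem bodyB_skip (t : String) (x : List String) (acc : List (List String))
    (h : ¬ PySem.List.pyGetD x 0 "" = t) : pvBodyB t acc x = acc ++ [pvDec x] := by
  simp [pvBodyB, h]

-- B's fold appends only on the right, so a prefix of the accumulator passes through.
theorem foldB_prefix (t : String) (l : List (List String)) (a b : List (List String)) :
    l.foldl (pvBodyB t) (a ++ b) = a ++ l.foldl (pvBodyB t) b := by
  induction l generalizing b with
  | nil => rfl
  | cons x l ih =>
      by_cases h : PySem.List.pyGetD x 0 "" = t
      · rw [List.foldl_cons, List.foldl_cons, bodyB_hit t x _ h, bodyB_hit t x _ h, ih]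
      · rw [List.foldl_cons, List.foldl_cons, bodyB_skip t x _ h, bodyB_skip t x _ h,
          List.append_assoc, ih]

-- Once the flag is true, A's loop is exactly B's suffix loop.
theorem foldA_true (t : String) (l : List (List String)) (acc : List (List String)) :
    l.foldl (pvBodyA t) (true, acc) = (true, l.foldl (pvBodyB t) acc) := by
  induction l generalizing acc with
  | nil => rfl
  | cons x l ih =>
      by_cases h : PySem.List.pyGetD x 0 "" = t
      · rw [List.foldl_cons, List.foldl_cons, bodyA_hit t x true acc h, bodyB_hit t x acc h]
        exact ih acc
      · rw [List.foldl_cons, List.foldl_cons, bodyA_skip_true t x acc h, bodyB_skip t x acc h]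
        exact ih _

-- A's accumulator is only ever appended to on the right.
theorem foldA_acc (t : String) (l : List (List String)) (b : Bool) (acc : List (List String)) :
    l.foldl (pvBodyA t) (b, acc)
      = ((l.foldl (pvBodyA t) (b, [])).1, acc ++ (l.foldl (pvBodyA t) (b, [])).2) := by
  induction l generalizing b acc with
  | nil => simp
  | cons x l ih =>
      by_cases h : PySem.List.pyGetD x 0 "" = t
      · rw [List.foldl_cons, List.foldl_cons, bodyA_hit t x b acc h, bodyA_hit t x b [] h,
          foldA_true t l acc, foldA_true t l []]
        have hp := foldB_prefix t l acc []
        simp only [List.append_nil] at hp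
        simp [hp]
      · cases b with
        | true =>
            rw [List.foldl_cons, List.foldl_cons, bodyA_skip_true t x acc h,
              bodyA_skip_true t x [] h, foldA_true, foldA_true, foldB_prefix]
            simp
        | false =>
            rw [List.foldl_cons, List.foldl_cons, bodyA_skip_false t x acc h,
              bodyA_skip_false t x [] h, ih false (acc ++ [x]), ih false ([] ++ [x])]
            simp

-- If no head matches, A's loop (flag still false) copies the list unchanged.
theorem foldA_no_match (t : String) (l : List (List String))
    (h : ∀ it ∈ l, PySem.List.pyGetD it 0 "" ≠ t) (acc : List (List String)) :
    l.foldl (pvBodyA t) (false, acc) = (false, acc ++ l) := by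
  induction l generalizing acc with
  | nil => simp
  | cons x l ih =>
      rw [List.foldl_cons, bodyA_skip_false t x acc (h x (by simp)),
        ih (fun it hit => h it (by simp [hit])) (acc ++ [x])]
      simp

theorem alt_eq_none (list_note : List (List String)) (id : Int)
    (h : PySem.List.index? (list_note.map (fun item => PySem.List.pyGetD item 0 ""))
        (PySem.Int.toStr id) = none) :
    delete_list_alt list_note id = list_note := by
  unfold delete_list_alt
  simp only [h]

theorem alt_eq_some (list_note : List (List String)) (id : Int) (k : Nat)
    (h : PySem.List.index? (list_note.map (fun item => PySem.List.pyGetD item 0 ""))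
        (PySem.Int.toStr id) = some k) :
    delete_list_alt list_note id
      = (list_note.drop (k + 1)).foldl (pvBodyB (PySem.Int.toStr id)) (list_note.take k) := by
  unfold delete_list_alt
  simp only [h]
  have e1 : ((k : Int) + 1) = (((k + 1 : Nat)) : Int) := by push_cast; ring
  rw [e1, PySem.List.slice_from_natCast, PySem.List.slice_to_natCast]
  rfl

theorem main_eq (list_note : List (List String)) (id : Int) :
    delete_list list_note id = delete_list_alt list_note id := by
  rw [delete_list_eq_foldA]
  induction list_note with
  | nil => rfl
  | cons item l ih =>
      by_cases h : PySem.List.pyGetD item 0 "" = PySem.Int.toStr id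
      · -- item is the first match: A switches the flag; B's index is 0.
        have hidx : PySem.List.index?
            ((item :: l).map (fun item => PySem.List.pyGetD item 0 ""))
            (PySem.Int.toStr id) = some 0 := by
          rw [List.map_cons, h, PySem.List.index?_cons_self]
        rw [alt_eq_some _ _ 0 hidx, List.foldl_cons, bodyA_hit _ _ _ _ h,
          foldA_true]
        rfl
      · rcases hk : PySem.List.index? (l.map (fun item => PySem.List.pyGetD item 0 ""))
            (PySem.Int.toStr id) with _ | k
        · -- no match anywhere: both sides return the list unchanged
          have hnot : ∀ it ∈ item :: l,
              PySem.List.pyGetD it 0 "" ≠ PySem.Int.toStr id := by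
            intro it hit
            rcases List.mem_cons.mp hit with rfl | hmem
            · exact h
            · intro hc
              have hm : PySem.Int.toStr id
                  ∈ l.map (fun item => PySem.List.pyGetD item 0 "") :=
                List.mem_map.mpr ⟨it, hmem, hc⟩
              rw [← PySem.List.index?_isSome_iff, hk] at hm
              simp at hm
          have hidx : PySem.List.index?
              ((item :: l).map (fun item => PySem.List.pyGetD item 0 ""))
              (PySem.Int.toStr id) = none := by
            rw [List.map_cons, PySem.List.index?_cons_of_ne _ h, hk, Option.map_none]
          rw [alt_eq_none _ _ hidx, foldA_no_match _ _ hnot]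
          simp
        · -- first match at index k of the tail, i.e. k+1 overall
          have hidx : PySem.List.index?
              ((item :: l).map (fun item => PySem.List.pyGetD item 0 ""))
              (PySem.Int.toStr id) = some (k + 1) := by
            rw [List.map_cons, PySem.List.index?_cons_of_ne _ h, hk, Option.map_some]
          rw [alt_eq_some _ _ (k + 1) hidx, List.foldl_cons, bodyA_skip_false _ _ _ h,
            foldA_acc, List.nil_append, List.take_succ_cons, List.drop_succ_cons]
          have hb := foldB_prefix (PySem.Int.toStr id) (l.drop (k + 1)) [item] (l.take k)
          rw [List.singleton_append] at hb
          rw [hb]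
          rw [alt_eq_some _ _ k hk] at ih
          rw [← ih]

-- ===== VERDICT (by name: the statement is the Claim_ definition above) =====
theorem delete_list_spec : Claim_equal_delete_list := by
  intro list_note id _ _
  unfold Spec_delete_list
  exact main_eq list_note id
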